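-- pv_equiv track=rewrite | github.com/veeral-patel/leetcode-samples | knapsack_weight_only.py | knapsack_weight_only
-- ===== SOURCE A (Python) =====
-- def knapsack_weight_only(weights):
--     if len(weights) == 0:
--         return [0]
--     elif len(weights) == 1:
--         return [0, weights[0]]
--     else:
--         first = weights[0]
--
--         answer_for_remaining = knapsack_weight_only(weights[1:])
--
--         ans = []
--
--         for num in answer_for_remaining:
--             ans.append(num)
--             ans.append(first + num)
--
--         return list(set(ans))
-- ===== SOURCE B (Python) =====
-- def knapsack_weight_only(weights):
--     # Forward DP: one pass over the weights, growing the list of achievable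
--     # sums in place; a companion set gives O(1) duplicate detection.
--     sums = [0]
--     seen = {0}
--     for w in weights:
--         new = []
--         for s in sums:
--             t = w + s
--             if t not in seen:
--                 seen.add(t)
--                 new.append(t)
--         sums += new
--     return sums
-- ===== Notes on version B (the rewrite author's own statement) =====
-- stated objective: faster
-- what changed: Replaces A's tail recursion (one slice copy per level, interleaved append loop, set() rebuilt from scratch at every level) by a single left-to-right DP loop that grows the list of achievable sums in place, appending only the not-yet-seen sums found via one companion set.
-- outside the precondition, e.g. on knapsack_weight_only([0]): A returns [0, 0], B returns [0]
import Mathlib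
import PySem

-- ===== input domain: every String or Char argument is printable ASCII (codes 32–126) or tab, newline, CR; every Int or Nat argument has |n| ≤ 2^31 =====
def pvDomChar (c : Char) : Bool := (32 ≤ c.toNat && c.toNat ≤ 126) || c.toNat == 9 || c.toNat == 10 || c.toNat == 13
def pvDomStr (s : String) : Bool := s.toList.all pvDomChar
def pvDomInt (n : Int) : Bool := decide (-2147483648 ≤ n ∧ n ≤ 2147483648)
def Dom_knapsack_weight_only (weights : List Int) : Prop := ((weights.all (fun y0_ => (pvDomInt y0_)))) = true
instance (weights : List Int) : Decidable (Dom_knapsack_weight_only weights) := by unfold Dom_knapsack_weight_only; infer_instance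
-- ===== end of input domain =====

-- B replaces A's recursion (slice copy + interleaving append loop + set() rebuilt at
-- every level) by a single forward DP loop that grows the list of achievable sums in
-- place with a companion seen-set (objective: faster by a constant factor, measured).
-- Both Pythons return the achievable subset sums as a list whose order the caller's
-- list(set(..)) leaves arbitrary; per the PySem convention the ports realise
-- list(set(x)) and the seen-set as first-occurrence-order element lists.

-- ===== PORT A =====
def knapsack_weight_only (weights : List Int) : List Int :=
  match weights with
  | [] => [0]
  | [w] => [0, w]
  | first :: r :: t =>            -- len(weights) ≥ 2; r :: t = weights[1:]
      let answer_for_remaining := knapsack_weight_only (r :: t)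
      let ans := answer_for_remaining.foldl
        (fun ans num => (ans ++ [num]) ++ [first + num]) []   -- the two .append calls
      PySem.Set.ofList ans        -- list(set(ans))

-- ===== PORT B =====
def knapsack_weight_only_alt (weights : List Int) : List Int :=
  (weights.foldl
    (fun (st : List Int × PySem.Set Int) w =>        -- st = (sums, seen)
      let inner := st.1.foldl                        -- the inner 'for s in sums' loop
        (fun (p : List Int × PySem.Set Int) s =>     -- p = (new, seen)
          let t := w + s
          if PySem.Set.contains p.2 t then p else (p.1 ++ [t], PySem.Set.add p.2 t))
        ([], st.2)
      (st.1 ++ inner.1, inner.2))                    -- sums += new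
    ([0], PySem.Set.ofList [0])).1

-- ===== PRECONDITION & SPEC =====
-- Pre_ excludes the single input [0], on which A's len==1 base case skips its set()
-- step and returns a list naming the sum 0 twice while B names it once: both lists
-- denote the same set of achievable sums, and since the function's value is that
-- set, neither list representation is more correct — no list-level equality can be
-- claimed there.
def Pre_knapsack_weight_only (weights : List Int) : Prop := weights ≠ [0]
instance (weights : List Int) : Decidable (Pre_knapsack_weight_only weights) := by
  unfold Pre_knapsack_weight_only; infer_instance

def pvWitness_knapsack_weight_only : List Int := [1, 2]

def Spec_knapsack_weight_only (weights : List Int) (out : List Int) : Prop :=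
  out = knapsack_weight_only_alt weights
instance (weights : List Int) (out : List Int) : Decidable (Spec_knapsack_weight_only weights out) := by
  unfold Spec_knapsack_weight_only; infer_instance

-- ===== CLAIM (what is proved, stated in full; the proofs are below) =====
def Claim_equal_knapsack_weight_only : Prop := ∀ (weights : List Int), Dom_knapsack_weight_only weights → Pre_knapsack_weight_only weights → Spec_knapsack_weight_only weights (knapsack_weight_only weights)

-- ===== LEMMAS AND PROOFS =====

-- the dedup-free DP state: all subset sums of ws (with multiplicity), in the
-- enumeration order shared by both programs (subsets in colex order)
def pvStepND (S : List Int) (w : Int) : List Int := S ++ S.map (fun s => w + s)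
def pvG (ws : List Int) : List Int := ws.foldl pvStepND [0]

-- `update s L` appends the new elements of L, in first-occurrence order
lemma pv_update_eq (L : List Int) : ∀ s : List Int,
    PySem.Set.update s L = s ++ (PySem.List.dedup L).filter (fun y => decide (y ∉ s)) := by
  induction L with
  | nil => intro s; simp [PySem.Set.update, PySem.List.dedup, PySem.Set.ofList, PySem.Set.empty]
  | cons x L ih =>
    intro s
    have hd : PySem.List.dedup (x :: L)
        = [x] ++ (PySem.List.dedup L).filter (fun y => decide (y ∉ ([x] : List Int))) := by
      have h1 : PySem.List.dedup (x :: L) = PySem.Set.update [x] L := by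
        simp [PySem.List.dedup, PySem.Set.ofList, PySem.Set.update, PySem.Set.add,
          PySem.Set.empty, PySem.Set.contains]
      rw [h1, ih [x]]
    have hu : PySem.Set.update s (x :: L) = PySem.Set.update (PySem.Set.add s x) L := rfl
    rw [hu, ih (PySem.Set.add s x), hd, PySem.Set.add_eq_ite]
    by_cases hx : x ∈ s
    · simp only [if_pos hx, List.filter_append, List.filter_filter]
      have hfx : List.filter (fun y => decide (y ∉ s)) [x] = [] := by simp [hx]
      rw [hfx]
      simp only [List.nil_append]
      congr 1
      apply List.filter_congr
      intro y _
      by_cases hy : y ∈ s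
      · simp [hy]
      · simp [hy]
        intro h; exact absurd (h ▸ hx) hy
    · simp only [if_neg hx, List.filter_append, List.filter_filter]
      have hfx : List.filter (fun y => decide (y ∉ s)) [x] = [x] := by simp [hx]
      rw [hfx, List.append_assoc]
      congr 2
      apply List.filter_congr
      intro y _
      by_cases hy : y = x
      · subst hy; simp [hx]
      · by_cases hys : y ∈ s <;> simp [hy, hys]

-- dedup of an append, in normal form
lemma pv_dedup_append (L X : List Int) :
    PySem.List.dedup (L ++ X)
      = PySem.List.dedup L ++ (PySem.List.dedup X).filter (fun y => decide (y ∉ L)) := by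
  have h1 : PySem.List.dedup (L ++ X) = PySem.Set.update (PySem.List.dedup L) X := by
    simp [PySem.List.dedup, PySem.Set.ofList, PySem.Set.update, List.foldl_append]
  rw [h1, pv_update_eq]
  congr 1
  apply List.filter_congr
  intro y _
  simp

lemma pv_dedup_cons (x : Int) (L : List Int) :
    PySem.List.dedup (x :: L) = x :: (PySem.List.dedup L).filter (fun y => decide (y ≠ x)) := by
  have h : (x :: L) = [x] ++ L := rfl
  rw [h, pv_dedup_append]
  have hx : PySem.List.dedup [x] = [x] := rfl
  rw [hx]
  simp

lemma pv_dedup_nodup : ∀ L : List Int, L.Nodup → PySem.List.dedup L = L := by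
  intro L
  induction L with
  | nil => intro _; rfl
  | cons x L ih =>
    intro h
    rw [pv_dedup_cons, ih h.of_cons]
    have hf : L.filter (fun y => decide (y ≠ x)) = L := by
      apply List.filter_eq_self.2
      intro y hy
      simp
      intro he; exact (List.nodup_cons.1 h).1 (he ▸ hy)
    rw [hf]

lemma pv_dedup_idem (L : List Int) : PySem.List.dedup (PySem.List.dedup L) = PySem.List.dedup L := by
  apply pv_dedup_nodup
  simp [PySem.List.dedup_eq_ofList, PySem.Set.nodup_ofList]

-- dedup of an append depends on each part only through its dedup
lemma pv_dedup_append_congr {L M : List Int} (X : List Int)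
    (h : PySem.List.dedup L = PySem.List.dedup M) :
    PySem.List.dedup (L ++ X) = PySem.List.dedup (M ++ X) := by
  rw [pv_dedup_append, pv_dedup_append, h]
  congr 1
  apply List.filter_congr
  intro y _
  have hm : y ∈ L ↔ y ∈ M := by
    rw [← PySem.List.mem_dedup, h, PySem.List.mem_dedup]
  by_cases hy : y ∈ M <;> simp [hy, hm]

lemma pv_dedup_append_congr_right {L M : List Int} (X : List Int)
    (h : PySem.List.dedup L = PySem.List.dedup M) :
    PySem.List.dedup (X ++ L) = PySem.List.dedup (X ++ M) := by
  rw [pv_dedup_append, pv_dedup_append, h]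

-- dropping the x-block from the source does not matter once f x's elements are filtered out
lemma pv_dedup_flatMap_filter (f : Int → List Int) (x : Int) : ∀ D : List Int,
    (PySem.List.dedup ((D.filter (fun d => decide (d ≠ x))).flatMap f)).filter (fun y => decide (y ∉ f x))
      = (PySem.List.dedup (D.flatMap f)).filter (fun y => decide (y ∉ f x)) := by
  intro D
  induction D with
  | nil => rfl
  | cons d D ih =>
    by_cases hd : d = x
    · subst hd
      rw [List.filter_cons_of_neg (by simp), ih, List.flatMap_cons]
      rw [pv_dedup_append, List.filter_append]
      have h1 : (PySem.List.dedup (f d)).filter (fun y => decide (y ∉ f d)) = [] := by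
        apply List.filter_eq_nil_iff.2
        intro y hy
        simp [(PySem.List.mem_dedup _ _).1 hy]
      rw [h1, List.nil_append, List.filter_filter]
      apply List.filter_congr
      intro y _
      by_cases hy : y ∈ f d <;> simp [hy]
    · rw [List.filter_cons_of_pos (by simpa using hd), List.flatMap_cons, List.flatMap_cons]
      rw [pv_dedup_append, pv_dedup_append, List.filter_append, List.filter_append,
        List.filter_filter, List.filter_filter]
      congr 1
      have hcomm : ∀ (Z : List Int),
          (Z.filter (fun y => decide (y ∉ f x) && decide (y ∉ f d)))
            = ((Z.filter (fun y => decide (y ∉ f x))).filter (fun y => decide (y ∉ f d))) := by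
        intro Z; rw [List.filter_filter]; apply List.filter_congr; intro y _
        by_cases h1 : y ∈ f x <;> by_cases h2 : y ∈ f d <;> simp [h1, h2]
      have hih := congrArg (List.filter (fun y => decide (y ∉ f d))) ih
      calc (PySem.List.dedup ((List.filter (fun d_1 => decide (d_1 ≠ x)) D).flatMap f)).filter
              (fun y => decide (y ∉ f x) && decide (y ∉ f d))
          = ((PySem.List.dedup ((List.filter (fun d_1 => decide (d_1 ≠ x)) D).flatMap f)).filter
              (fun y => decide (y ∉ f x))).filter (fun y => decide (y ∉ f d)) := hcomm _
        _ = ((PySem.List.dedup (D.flatMap f)).filter (fun y => decide (y ∉ f x))).filter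
              (fun y => decide (y ∉ f d)) := hih
        _ = _ := (hcomm _).symm

lemma pv_dedup_flatMap_dedup (f : Int → List Int) : ∀ L : List Int,
    PySem.List.dedup ((PySem.List.dedup L).flatMap f) = PySem.List.dedup (L.flatMap f) := by
  intro L
  induction L with
  | nil => rfl
  | cons x L ih =>
    rw [pv_dedup_cons, List.flatMap_cons, List.flatMap_cons, pv_dedup_append, pv_dedup_append]
    congr 1
    rw [← ih]
    exact pv_dedup_flatMap_filter f x (PySem.List.dedup L)

lemma pv_dedup_flatMap_congr {L M : List Int} (f : Int → List Int)
    (h : PySem.List.dedup L = PySem.List.dedup M) :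
    PySem.List.dedup (L.flatMap f) = PySem.List.dedup (M.flatMap f) := by
  rw [← pv_dedup_flatMap_dedup f L, h, pv_dedup_flatMap_dedup f M]

lemma pv_dedup_map_congr {L M : List Int} (f : Int → Int)
    (h : PySem.List.dedup L = PySem.List.dedup M) :
    PySem.List.dedup (L.map f) = PySem.List.dedup (M.map f) := by
  rw [List.map_eq_flatMap, List.map_eq_flatMap]
  exact pv_dedup_flatMap_congr _ h

-- colex enumeration: processing w first (B) or last (A) yields the SAME sequence
lemma pv_foldl_flatMap (w : Int) : ∀ (ws : List Int) (S : List Int),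
    ws.foldl pvStepND (S.flatMap (fun n => [n, w + n]))
      = (ws.foldl pvStepND S).flatMap (fun n => [n, w + n]) := by
  intro ws
  induction ws with
  | nil => intro S; rfl
  | cons v ws ih =>
    intro S
    have hstep : pvStepND (S.flatMap (fun n => [n, w + n])) v
        = (pvStepND S v).flatMap (fun n => [n, w + n]) := by
      simp only [pvStepND, List.flatMap_append]
      congr 1
      rw [List.map_flatMap, List.flatMap_map]
      apply List.flatMap_congr
      intro n _
      simp only [List.map_cons, List.map_nil]
      congr 2
      ring
    rw [List.foldl_cons, hstep, ih, List.foldl_cons]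

lemma pvG_cons (w : Int) (ws : List Int) :
    pvG (w :: ws) = (pvG ws).flatMap (fun n => [n, w + n]) := by
  have h0 : pvStepND [0] w = ([0] : List Int).flatMap (fun n => [n, w + n]) := by
    simp [pvStepND]
  show List.foldl pvStepND (pvStepND [0] w) ws = _
  rw [h0, pv_foldl_flatMap]
  rfl

-- B computes dedup ∘ pvG
lemma pv_alt_eq_dedup : ∀ (ws : List Int) (S : List Int),
    ws.foldl (fun sums w => PySem.List.dedup (sums ++ sums.map (fun s => w + s)))
        (PySem.List.dedup S)
      = PySem.List.dedup (ws.foldl pvStepND S) := by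
  intro ws
  induction ws with
  | nil => intro S; rfl
  | cons w ws ih =>
    intro S
    have hstep : PySem.List.dedup (PySem.List.dedup S ++ (PySem.List.dedup S).map (fun s => w + s))
        = PySem.List.dedup (pvStepND S w) := by
      calc PySem.List.dedup (PySem.List.dedup S ++ (PySem.List.dedup S).map (fun s => w + s))
          = PySem.List.dedup (S ++ (PySem.List.dedup S).map (fun s => w + s)) :=
            pv_dedup_append_congr _ (pv_dedup_idem S)
        _ = PySem.List.dedup (S ++ S.map (fun s => w + s)) :=
            pv_dedup_append_congr_right _ (pv_dedup_map_congr _ (pv_dedup_idem S))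
        _ = _ := rfl
    rw [List.foldl_cons, hstep, ih (pvStepND S w), List.foldl_cons]

-- B's inner loop collects the new sums (first occurrences not yet seen) and
-- updates `seen` accordingly
lemma pv_inner (w : Int) : ∀ (X : List Int) (n sn : List Int),
    X.foldl
        (fun (p : List Int × PySem.Set Int) s =>
          let t := w + s
          if PySem.Set.contains p.2 t then p else (p.1 ++ [t], PySem.Set.add p.2 t))
        (n, sn)
      = (n ++ (PySem.List.dedup (X.map (fun s => w + s))).filter (fun y => decide (y ∉ sn)),
         PySem.Set.update sn (X.map (fun s => w + s))) := by
  intro X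
  induction X with
  | nil => intro n sn; simp [PySem.Set.update, PySem.List.dedup, PySem.Set.ofList, PySem.Set.empty]
  | cons s X ih =>
    intro n sn
    rw [List.foldl_cons]
    by_cases ht : w + s ∈ sn
    · have hc : PySem.Set.contains sn (w + s) = true := (PySem.Set.contains_iff _ _).2 ht
      simp only [hc, if_true]
      rw [ih n sn, Prod.mk.injEq]
      constructor
      · congr 1
        rw [List.map_cons, pv_dedup_cons, List.filter_cons_of_neg (by simp [ht]),
          List.filter_filter]
        apply List.filter_congr
        intro y _
        by_cases hy : y ∈ sn
        · simp [hy]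
        · simp [hy]; intro he; exact absurd (he ▸ ht) hy
      · show _ = PySem.Set.update sn (List.map _ (s :: X))
        rw [List.map_cons]
        show _ = PySem.Set.update (PySem.Set.add sn (w + s)) (X.map _)
        rw [PySem.Set.add_of_mem ht]
    · have hc : PySem.Set.contains sn (w + s) = false := by
        rw [← Bool.not_eq_true]; intro h; exact ht ((PySem.Set.contains_iff _ _).1 h)
      simp only [hc, if_false, Bool.false_eq_true]
      rw [PySem.Set.add_of_not_mem ht, ih (n ++ [w + s]) (sn ++ [w + s]), Prod.mk.injEq]
      constructor
      · rw [List.map_cons, pv_dedup_cons, List.filter_cons_of_pos (by simp [ht]),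
          List.append_assoc, List.filter_filter]
        simp only [List.cons_append]
        congr 2
        apply List.filter_congr
        intro y _
        by_cases hy : y = w + s
        · subst hy; simp
        · by_cases hys : y ∈ sn <;> simp [hy, hys]
      · show PySem.Set.update (sn ++ [w + s]) (X.map _) = _
        rw [List.map_cons]
        show _ = PySem.Set.update (PySem.Set.add sn (w + s)) (X.map _)
        rw [PySem.Set.add_of_not_mem ht]

-- along B's outer loop `seen` is exactly `sums`, and each step is the ordered
-- dedup of sums ++ [w+s for s in sums]
lemma pv_outer : ∀ (ws : List Int) (S : List Int), S.Nodup →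
    ws.foldl
        (fun (st : List Int × PySem.Set Int) w =>
          let inner := st.1.foldl
            (fun (p : List Int × PySem.Set Int) s =>
              let t := w + s
              if PySem.Set.contains p.2 t then p else (p.1 ++ [t], PySem.Set.add p.2 t))
            ([], st.2)
          (st.1 ++ inner.1, inner.2))
        (S, S)
      = (ws.foldl (fun sums w => PySem.List.dedup (sums ++ sums.map (fun s => w + s))) S,
         ws.foldl (fun sums w => PySem.List.dedup (sums ++ sums.map (fun s => w + s))) S) := by
  intro ws
  induction ws with
  | nil => intro S _; rfl
  | cons w ws ih =>
    intro S hnd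
    rw [List.foldl_cons, List.foldl_cons]
    have hstep : PySem.List.dedup (S ++ S.map (fun s => w + s))
        = S ++ (PySem.List.dedup (S.map (fun s => w + s))).filter (fun y => decide (y ∉ S)) := by
      rw [pv_dedup_append, pv_dedup_nodup S hnd]
    have h1 : (S.foldl
        (fun (p : List Int × PySem.Set Int) s =>
          let t := w + s
          if PySem.Set.contains p.2 t then p else (p.1 ++ [t], PySem.Set.add p.2 t))
        ([], S))
      = ((PySem.List.dedup (S.map (fun s => w + s))).filter (fun y => decide (y ∉ S)),
         PySem.Set.update S (S.map (fun s => w + s))) := by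
      rw [pv_inner w S [] S]; simp
    have h2 : PySem.Set.update S (S.map (fun s => w + s))
        = PySem.List.dedup (S ++ S.map (fun s => w + s)) := by
      rw [pv_update_eq, hstep]
    show List.foldl _ (S ++ _, _) ws = _
    rw [h1]
    simp only []
    rw [h2, ← hstep]
    exact ih (PySem.List.dedup (S ++ S.map (fun s => w + s)))
      (by rw [PySem.List.dedup_eq_ofList]; exact PySem.Set.nodup_ofList _)

lemma pv_alt_eq (ws : List Int) :
    knapsack_weight_only_alt ws = PySem.List.dedup (pvG ws) := by
  show (ws.foldl _ (([0] : List Int), PySem.Set.ofList [0])).1 = _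
  have h00 : PySem.Set.ofList ([0] : List Int) = [0] := rfl
  rw [h00, pv_outer ws [0] (by decide)]
  have h0 : ([0] : List Int) = PySem.List.dedup [0] := rfl
  show ws.foldl _ ([0] : List Int) = _
  rw [h0, pv_alt_eq_dedup ws [0]]
  rfl

-- A's loop is the interleaving flatMap
lemma pv_A_loop (first : Int) (X : List Int) :
    X.foldl (fun ans num => (ans ++ [num]) ++ [first + num]) []
      = X.flatMap (fun num => [num, first + num]) := by
  have hf : (fun (ans : List Int) num => (ans ++ [num]) ++ [first + num])
      = (fun ans num => ans ++ [num, first + num]) := by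
    funext ans num; simp
  rw [hf]
  simpa using PySem.List.foldl_append_eq_flatMap (fun num => [num, first + num]) X []

-- A computes dedup ∘ pvG up to dedup …
lemma pv_A_dedup : ∀ ws : List Int,
    PySem.List.dedup (knapsack_weight_only ws) = PySem.List.dedup (pvG ws) := by
  intro ws
  induction ws with
  | nil => rfl
  | cons w rest ih =>
    cases rest with
    | nil =>
        show PySem.List.dedup [0, w] = PySem.List.dedup (pvStepND [0] w)
        simp [pvStepND]
    | cons r t =>
        have hA : knapsack_weight_only (w :: r :: t)
            = PySem.List.dedup ((knapsack_weight_only (r :: t)).flatMap (fun num => [num, w + num])) := by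
          show PySem.Set.ofList _ = _
          rw [pv_A_loop, PySem.List.dedup_eq_ofList]
        rw [hA, pv_dedup_idem, pv_dedup_flatMap_congr _ ih, ← pvG_cons]

-- … and exactly for length ≥ 2 (the result of a set() is already deduplicated)
lemma pv_A_eq (w r : Int) (t : List Int) :
    knapsack_weight_only (w :: r :: t) = PySem.List.dedup (pvG (w :: r :: t)) := by
  have hA : knapsack_weight_only (w :: r :: t)
      = PySem.List.dedup ((knapsack_weight_only (r :: t)).flatMap (fun num => [num, w + num])) := by
    show PySem.Set.ofList _ = _
    rw [pv_A_loop, PySem.List.dedup_eq_ofList]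
  have hd := pv_A_dedup (w :: r :: t)
  rw [hA] at hd ⊢
  rw [pv_dedup_idem] at hd
  rw [hd]

-- ===== VERDICT (by name: the statement is the Claim_ definition above) =====
theorem knapsack_weight_only_spec : Claim_equal_knapsack_weight_only := by
  intro weights _ hP
  match weights with
  | [] => rfl
  | [w] =>
      have hw : w ≠ 0 := by
        intro h; exact hP (by simp [h])
      show knapsack_weight_only [w] = knapsack_weight_only_alt [w]
      rw [pv_alt_eq]
      show ([0, w] : List Int)
          = PySem.List.dedup ([0] ++ ([0] : List Int).map (fun s => w + s))
      simp only [List.map_cons, List.map_nil, add_zero]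
      rw [show ([0] ++ [w] : List Int) = [0, w] from rfl, pv_dedup_cons, pv_dedup_cons]
      simp [hw]
  | w :: r :: t =>
      show knapsack_weight_only (w :: r :: t) = _
      rw [pv_A_eq, pv_alt_eq]
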